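-- pv_equiv track=rewrite | github.com/dlrtn/algorithm | programmers/python/algorithm/배열 만들기 4.py | solution
-- ===== SOURCE A (Python) =====
-- def solution(arr):
--     i = 0
--     stk = []
--     while len(arr) > i:
--         if len(stk) == 0:
--             stk.append(arr[i])
--             i += 1
--         else:
--             if stk[-1] < arr[i]:
--                 stk.append(arr[i])
--                 i += 1
--             else:
--                 stk.pop(-1)
--     return stk
-- ===== SOURCE B (Python) =====
-- def solution(arr):
--     # An element survives A's stack iff it is strictly smaller than every
--     # element after it, so one backward pass with a running minimum suffices.
--     res = []
--     m = None
--     for x in reversed(arr):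
--         if m is None or x < m:
--             res.append(x)
--             m = x
--     res.reverse()
--     return res
-- ===== Notes on version B (the rewrite author's own statement) =====
-- stated objective: alternative
-- what changed: Replaces A's monotonic stack (outer while over a manual index, popping until the top is smaller) with a stack-free backward pass: the result is exactly the elements strictly smaller than every later element, collected with a single running minimum over reversed(arr).
import Mathlib
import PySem

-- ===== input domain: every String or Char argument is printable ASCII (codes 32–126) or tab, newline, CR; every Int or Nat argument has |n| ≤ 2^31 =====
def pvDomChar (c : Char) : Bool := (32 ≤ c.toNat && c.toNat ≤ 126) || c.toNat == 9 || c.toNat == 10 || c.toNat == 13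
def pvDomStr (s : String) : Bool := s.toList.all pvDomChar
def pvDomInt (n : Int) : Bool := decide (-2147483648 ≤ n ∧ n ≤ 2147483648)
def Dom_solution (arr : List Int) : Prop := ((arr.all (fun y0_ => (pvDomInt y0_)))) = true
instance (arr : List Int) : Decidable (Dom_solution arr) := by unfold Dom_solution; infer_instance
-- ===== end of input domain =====

-- B drops the stack entirely: the surviving elements are exactly those strictly smaller than
-- every later element, found by one backward pass with a running minimum (same O(n) cost).

-- ===== PORT A =====
-- A's stack is kept head-as-top (Python's stk reversed); the final return reverses it back.
-- The outer while becomes recursion on the lexicographic measure (arr.length - i, stk.length).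
def solutionLoop (arr : List Int) (i : Nat) (stk : List Int) : List Int :=
  if h : i < arr.length then
    if hs : stk = [] then
      solutionLoop arr (i + 1) [arr[i]]                -- stk.append(arr[i]); i += 1
    else if stk.headI < arr[i] then                    -- stk[-1] < arr[i]
      solutionLoop arr (i + 1) (arr[i] :: stk)         -- stk.append(arr[i]); i += 1
    else
      solutionLoop arr i stk.tail                      -- stk.pop(-1)
  else
    stk.reverse
termination_by (arr.length - i, stk.length)
decreasing_by
  · exact Prod.Lex.left _ _ (by omega)
  · exact Prod.Lex.left _ _ (by omega)
  · exact Prod.Lex.right _ (by cases stk with | nil => exact absurd rfl hs | cons a l => simp)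

def solution (arr : List Int) : List Int :=
  solutionLoop arr 0 []

-- ===== PORT B =====
-- state = (res, m): res gets x appended when m is None or x < m, and then m := x
def solution_alt (arr : List Int) : List Int :=
  let st := arr.reverse.foldl
    (fun (st : List Int × Option Int) x =>
      match st.2 with
      | none => (st.1 ++ [x], some x)
      | some m => if x < m then (st.1 ++ [x], some x) else st)
    ([], none)
  st.1.reverse

-- ===== PRECONDITION & SPEC =====
def Spec_solution (arr : List Int) (out : List Int) : Prop := out = solution_alt arr
instance (arr : List Int) (out : List Int) : Decidable (Spec_solution arr out) := by unfold Spec_solution; infer_instance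

-- ===== CLAIM (what is proved, stated in full; the proofs are below) =====
def Claim_equal_solution : Prop := ∀ (arr : List Int), Dom_solution arr → Spec_solution arr (solution arr)

-- ===== LEMMAS AND PROOFS =====

-- the common characterisation: elements strictly smaller than every later element
def keep : List Int → List Int
  | [] => []
  | x :: xs => if ∀ y ∈ xs, x < y then x :: keep xs else keep xs

theorem keep_cons (x : Int) (xs : List Int) :
    keep (x :: xs) = if ∀ y ∈ xs, x < y then x :: keep xs else keep xs := rfl

-- A-side proof helper: A's inner popping, as a function on the head-as-top stack
def drainB (x : Int) : List Int → List Int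
  | [] => []
  | t :: rest => if t ≥ x then drainB x rest else t :: rest

theorem solutionLoop_eq_foldl (arr : List Int) (i : Nat) (stk : List Int) :
    solutionLoop arr i stk
      = ((arr.drop i).foldl (fun s x => x :: drainB x s) stk).reverse := by
  rw [solutionLoop]
  by_cases h : i < arr.length
  · have hdrop : arr.drop i = arr[i] :: arr.drop (i + 1) :=
      List.drop_eq_getElem_cons h
    simp only [dif_pos h]
    cases stk with
    | nil =>
      rw [dif_pos rfl, solutionLoop_eq_foldl arr (i + 1)]
      rw [hdrop, List.foldl_cons]
      rfl
    | cons t rest =>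
      rw [dif_neg (List.cons_ne_nil t rest)]
      by_cases hlt : (t :: rest).headI < arr[i]
      · rw [if_pos hlt, solutionLoop_eq_foldl arr (i + 1)]
        have hd : drainB (arr[i]) (t :: rest) = t :: rest := by
          simp only [List.headI] at hlt
          simp [drainB, not_le.mpr hlt]
        rw [hdrop, List.foldl_cons, hd]
      · rw [if_neg hlt, solutionLoop_eq_foldl arr i]
        have hd : drainB (arr[i]) (t :: rest) = drainB (arr[i]) rest := by
          simp only [List.headI] at hlt
          simp [drainB, le_of_not_gt hlt]
        simp only [List.tail_cons]
        rw [hdrop, List.foldl_cons, List.foldl_cons, hd]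
  · simp only [dif_neg h]
    rw [List.drop_eq_nil_of_le (by omega), List.foldl_nil]
termination_by (arr.length - i, stk.length)
decreasing_by
  · exact Prod.Lex.left _ _ (by omega)
  · exact Prod.Lex.left _ _ (by omega)
  · exact Prod.Lex.right _ (by simp)

theorem keep_mem {y : Int} {l : List Int} (h : y ∈ keep l) : y ∈ l := by
  induction l with
  | nil => simp [keep] at h
  | cons x xs ih =>
    unfold keep at h
    split at h
    · rcases List.mem_cons.mp h with h | h
      · simp [h]
      · exact List.mem_cons_of_mem _ (ih h)
    · exact List.mem_cons_of_mem _ (ih h)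

theorem keep_pairwise (l : List Int) : (keep l).Pairwise (· < ·) := by
  induction l with
  | nil => simp [keep]
  | cons x xs ih =>
    unfold keep
    split
    · exact List.Pairwise.cons (fun y hy => ‹∀ y ∈ xs, x < y› y (keep_mem hy)) ih
    · exact ih

theorem drainB_of_pairwise_gt {x : Int} {s : List Int} (h : s.Pairwise (· > ·)) :
    drainB x s = s.filter (fun t => decide (t < x)) := by
  induction s with
  | nil => simp [drainB]
  | cons t rest ih =>
    rcases List.pairwise_cons.mp h with ⟨ht, hrest⟩
    by_cases hge : t ≥ x
    · rw [drainB, if_pos hge, ih hrest, List.filter_cons]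
      simp [not_lt.mpr hge]
    · rw [drainB, if_neg hge, List.filter_cons]
      have htx : t < x := lt_of_not_ge hge
      simp only [htx, decide_true, if_pos]
      congr 1
      rw [List.filter_eq_self.mpr]
      intro y hy
      simpa using lt_trans (ht y hy) htx

theorem keep_append_singleton (l : List Int) (x : Int) :
    keep (l ++ [x]) = (keep l).filter (fun t => decide (t < x)) ++ [x] := by
  induction l with
  | nil => simp [keep]
  | cons y ys ih =>
    rw [show y :: ys ++ [x] = y :: (ys ++ [x]) from rfl, keep_cons, keep_cons]
    have hall : (∀ z ∈ ys ++ [x], y < z) ↔ ((∀ z ∈ ys, y < z) ∧ y < x) := by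
      constructor
      · intro h; exact ⟨fun z hz => h z (List.mem_append_left _ hz), h x (by simp)⟩
      · rintro ⟨h1, h2⟩ z hz
        rcases List.mem_append.mp hz with hz | hz
        · exact h1 z hz
        · simpa [List.mem_singleton.mp hz] using h2
    by_cases h1 : ∀ z ∈ ys, y < z
    · by_cases h2 : y < x
      · rw [if_pos (hall.mpr ⟨h1, h2⟩), ih]
        simp [if_pos h1, h2]
      · rw [if_neg (fun h => h2 (hall.mp h).2), ih]
        simp [if_pos h1, h2]
    · have : ¬ ∀ z ∈ ys ++ [x], y < z := fun h => h1 (hall.mp h).1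
      rw [if_neg this, ih, if_neg h1]

theorem foldA_eq_keep (l : List Int) :
    l.foldl (fun s x => x :: drainB x s) [] = (keep l).reverse := by
  induction l using List.reverseRecOn with
  | nil => simp [keep]
  | append_singleton l x ih =>
    rw [List.foldl_append, List.foldl_cons, List.foldl_nil, ih]
    have hp : ((keep l).reverse).Pairwise (· > ·) := by
      rw [List.pairwise_reverse]
      exact keep_pairwise l
    rw [drainB_of_pairwise_gt hp, List.filter_reverse, keep_append_singleton]
    simp

def minOpt : List Int → Option Int
  | [] => none
  | x :: xs => some (match minOpt xs with | none => x | some m => min x m)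

theorem minOpt_none {l : List Int} (h : minOpt l = none) : l = [] := by
  cases l with
  | nil => rfl
  | cons x xs => simp [minOpt] at h

theorem lt_minOpt_iff {x m : Int} {l : List Int} (h : minOpt l = some m) :
    x < m ↔ ∀ y ∈ l, x < y := by
  induction l generalizing m with
  | nil => simp [minOpt] at h
  | cons y ys ih =>
    simp only [minOpt] at h
    cases hys : minOpt ys with
    | none =>
      have := minOpt_none hys
      subst this
      simp [hys] at h
      simp [← h]
    | some m' =>
      rw [hys] at h
      injection h with h
      subst h
      constructor
      · intro hx z hz
        rcases List.mem_cons.mp hz with hz | hz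
        · exact hz ▸ lt_of_lt_of_le hx (min_le_left _ _)
        · exact (ih hys).mp (lt_of_lt_of_le hx (min_le_right _ _)) z hz
      · intro hall
        exact lt_min (hall y (by simp)) ((ih hys).mpr fun z hz => hall z (List.mem_cons_of_mem _ hz))

theorem foldB_eq_keep (l : List Int) :
    l.reverse.foldl
      (fun (st : List Int × Option Int) x =>
        match st.2 with
        | none => (st.1 ++ [x], some x)
        | some m => if x < m then (st.1 ++ [x], some x) else st)
      ([], none) = ((keep l).reverse, minOpt l) := by
  induction l with
  | nil => simp [keep, minOpt]
  | cons x xs ih =>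
    rw [List.reverse_cons, List.foldl_append, ih, List.foldl_cons, List.foldl_nil]
    cases hxs : minOpt xs with
    | none =>
      have := minOpt_none hxs
      subst this
      simp [keep, minOpt]
    | some m =>
      simp only
      by_cases hx : x < m
      · rw [if_pos hx]
        have hall : ∀ y ∈ xs, x < y := (lt_minOpt_iff hxs).mp hx
        rw [Prod.mk.injEq]
        constructor
        · rw [keep, if_pos hall, List.reverse_cons]
        · simp [minOpt, hxs, min_eq_left (le_of_lt hx)]
      · rw [if_neg hx]
        have hnall : ¬ ∀ y ∈ xs, x < y := fun h => hx ((lt_minOpt_iff hxs).mpr h)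
        rw [Prod.mk.injEq]
        constructor
        · rw [keep, if_neg hnall]
        · simp [minOpt, hxs, min_eq_right (le_of_not_gt hx)]

-- ===== VERDICT (by name: the statement is the Claim_ definition above) =====
theorem solution_spec : Claim_equal_solution := by
  intro arr _
  unfold Spec_solution solution solution_alt
  rw [solutionLoop_eq_foldl]
  simp only [List.drop_zero]
  rw [foldA_eq_keep, foldB_eq_keep]
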